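-- pv_equiv track=rewrite | github.com/ThenTech/BDA-Assignments | Plagiarism/Resources/submissions/submissions/2199927.py | replace
-- ===== SOURCE A (Python) =====
-- def replace(pattern, replacement, corpus):
--     new_string = ""
--
--     for index in range(len(corpus)):
--         if corpus[index:index + len(pattern)] == pattern:
--             new_string += replacement
--         else:
--             new_string += corpus[index]
--
--     return new_string
-- ===== SOURCE B (Python) =====
-- def replace(pattern, replacement, corpus):
--     # Collect all (possibly overlapping) occurrence start positions with str.find,
--     # then emit the output in a single two-pointer pass over the corpus.
--     starts = []
--     i = corpus.find(pattern)
--     while i != -1: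
--         starts.append(i)
--         i = corpus.find(pattern, i + 1)
--     out = []
--     j = 0
--     for i, ch in enumerate(corpus):
--         if j < len(starts) and starts[j] == i:
--             out.append(replacement)
--             j += 1
--         else:
--             out.append(ch)
--     return ''.join(out)
-- ===== Notes on version B (the rewrite author's own statement) =====
-- stated objective: faster
-- what changed: B first collects all (overlapping) occurrence start positions with str.find, then builds the output in one two-pointer pass, instead of slicing and comparing the pattern at every corpus index.
import Mathlib
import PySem

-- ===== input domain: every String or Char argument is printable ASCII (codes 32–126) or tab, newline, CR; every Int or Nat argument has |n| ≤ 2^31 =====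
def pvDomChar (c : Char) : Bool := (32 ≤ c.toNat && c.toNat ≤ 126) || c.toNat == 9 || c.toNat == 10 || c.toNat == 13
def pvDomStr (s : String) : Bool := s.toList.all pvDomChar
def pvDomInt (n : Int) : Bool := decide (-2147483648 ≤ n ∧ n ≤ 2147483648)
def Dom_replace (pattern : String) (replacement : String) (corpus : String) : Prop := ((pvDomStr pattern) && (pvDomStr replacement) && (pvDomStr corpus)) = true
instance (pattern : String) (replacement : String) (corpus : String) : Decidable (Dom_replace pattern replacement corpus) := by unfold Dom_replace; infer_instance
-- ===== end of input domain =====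

-- B replaces A's per-index slice comparison by "collect all occurrence starts with str.find, then one two-pointer output pass".

-- ===== PORT A =====
-- A: for index in range(len(corpus)): if corpus[index:index+len(pattern)] == pattern: add replacement else add corpus[index]
-- (corpus[index] is always in range inside the loop, so the 'none' of pyGet? — contributing [] — is unreachable.)
def replace (pattern : String) (replacement : String) (corpus : String) : String :=
  String.ofList ((List.range corpus.toList.length).foldl
    (fun (acc : List Char) (index : Nat) =>
      if PySem.List.slice corpus.toList (some (index : Int)) (some ((index : Int) + (pattern.toList.length : Int))) = pattern.toList
      then acc ++ replacement.toList
      else acc ++ (PySem.List.pyGet? corpus.toList (index : Int)).toList)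
    [])

-- ===== PORT B =====
-- needed by pvFindAll's termination: a successful find from start i lands in [i, len corpus]
theorem pvFindFrom_bounds (c p : List Char) (i : Nat)
    (h : PySem.Chars.findFrom c p (i : Int) none ≠ -1) :
    (i : Int) ≤ PySem.Chars.findFrom c p (i : Int) none ∧
      PySem.Chars.findFrom c p (i : Int) none ≤ c.length := by
  by_cases hi : i ≤ c.length
  · rw [PySem.Chars.findFrom_natCast c p i hi] at h ⊢
    have h1 := PySem.Chars.neg_one_le_find (c.drop i) p
    have h2 := PySem.Chars.find_le_length (c.drop i) p
    simp only [List.length_drop] at h2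
    split at h
    · exact absurd rfl h
    · rw [if_neg (by assumption)]
      constructor <;> [omega; (push_cast at h2 ⊢; omega)]
  · exfalso; apply h
    have hcast : ((c.length : Int)) < (i : Int) := by exact_mod_cast Nat.lt_of_not_le hi
    simp only [PySem.Chars.findFrom]
    rw [if_neg (show ¬ ((i : Int) < 0) by omega), if_pos hcast]

-- B's while loop: all occurrence start positions of pattern in corpus, from start index i on
def pvFindAll (c p : List Char) (i : Nat) : List Nat :=
  let r := PySem.Chars.findFrom c p (i : Int) none
  if h : r = -1 then []
  else r.toNat :: pvFindAll c p (r.toNat + 1)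
termination_by c.length + 1 - i
decreasing_by
  have := pvFindFrom_bounds c p i h
  omega

-- B's for loop: two-pointer merge of the corpus characters with the sorted start positions
def pvMerge (rep : List Char) (starts : List Nat) (i : Nat) (cs : List Char) : List Char :=
  match cs with
  | [] => []
  | ch :: rest =>
    match starts with
    | [] => ch :: pvMerge rep [] (i + 1) rest
    | j :: js =>
      if j = i then rep ++ pvMerge rep js (i + 1) rest
      else ch :: pvMerge rep (j :: js) (i + 1) rest

def replace_alt (pattern : String) (replacement : String) (corpus : String) : String :=
  String.ofList (pvMerge replacement.toList (pvFindAll corpus.toList pattern.toList 0) 0 corpus.toList)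

-- ===== PRECONDITION & SPEC =====
def Spec_replace (pattern : String) (replacement : String) (corpus : String) (out : String) : Prop := out = replace_alt pattern replacement corpus
instance (pattern : String) (replacement : String) (corpus : String) (out : String) : Decidable (Spec_replace pattern replacement corpus out) := by unfold Spec_replace; infer_instance

-- ===== CLAIM (what is proved, stated in full; the proofs are below) =====
def Claim_equal_replace : Prop := ∀ (pattern : String) (replacement : String) (corpus : String), Dom_replace pattern replacement corpus → Spec_replace pattern replacement corpus (replace pattern replacement corpus)

-- ===== LEMMAS AND PROOFS =====

-- the common per-index contribution both programs produce at position j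
def pvOut (rep p c : List Char) (j : Nat) : List Char :=
  if p <+: c.drop j then rep else (getElem? c j).toList

theorem pvFindAll_ge (c p : List Char) (i : Nat) : ∀ j ∈ pvFindAll c p i, i ≤ j := by
  fun_induction pvFindAll c p i with
  | case1 i r hr => simp
  | case2 i r hr ih =>
    intro j hj
    have hb := pvFindFrom_bounds c p i hr
    rcases List.mem_cons.1 hj with h | h
    · omega
    · have := ih j h; omega

-- one step of the find loop, seen from index i < len c
theorem pvFindAll_step (c p : List Char) (i : Nat) (hi : i < c.length) :
    pvFindAll c p i =
      if p <+: c.drop i then i :: pvFindAll c p (i + 1) else pvFindAll c p (i + 1) := by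
  have hi' : i ≤ c.length := le_of_lt hi
  have hi1 : i + 1 ≤ c.length := hi
  by_cases hp : p <+: c.drop i
  · -- pattern occurs at i itself: find from i returns i
    have hf0 : PySem.Chars.find (c.drop i) p = 0 := by
      have h1 : 0 ≤ PySem.Chars.find (c.drop i) p :=
        (PySem.Chars.find_nonneg_iff _ _).2 hp.isInfix
      have hs := (PySem.Chars.find_spec h1).2
      by_contra hne
      have : (0 : Nat) < (PySem.Chars.find (c.drop i) p).toNat := by omega
      exact hs 0 this (by simpa using hp)
    conv_lhs => rw [pvFindAll]
    rw [if_pos hp]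
    simp only [PySem.Chars.findFrom_natCast c p i hi', hf0,
      if_neg (show ¬ ((0 : Int) = -1) by decide), add_zero]
    rw [dif_neg (show ¬ ((i : Int) = -1) by omega)]
    simp
  · rw [if_neg hp]
    conv_lhs => rw [pvFindAll]
    conv_rhs => rw [pvFindAll]
    simp only [PySem.Chars.findFrom_natCast c p i hi',
      PySem.Chars.findFrom_natCast c p (i + 1) hi1]
    have hdrop : c.drop i = getElem c i hi :: c.drop (i + 1) := List.drop_eq_getElem_cons hi
    by_cases hf' : PySem.Chars.find (c.drop (i + 1)) p = -1
    · -- no occurrence after i+1, and not at i either: both loops stop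
      have : PySem.Chars.find (c.drop i) p = -1 := by
        rw [PySem.Chars.find_eq_neg_one_iff]
        intro hinf
        rw [hdrop, List.infix_cons_iff] at hinf
        rcases hinf with h | h
        · exact hp (by rwa [hdrop])
        · exact (PySem.Chars.find_eq_neg_one_iff _ _).1 hf' h
      simp [this, hf']
    · -- first occurrence from i is the first occurrence from i+1
      have h1' : 0 ≤ PySem.Chars.find (c.drop (i + 1)) p := by
        have := PySem.Chars.neg_one_le_find (c.drop (i + 1)) p; omega
      obtain ⟨hocc', hmin'⟩ := PySem.Chars.find_spec h1'
      have hf : PySem.Chars.find (c.drop i) p ≠ -1 := by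
        rw [Ne, PySem.Chars.find_eq_neg_one_iff, not_not, hdrop, List.infix_cons_iff]
        right
        exact ((PySem.Chars.find_nonneg_iff _ _).1 h1')
      have h1 : 0 ≤ PySem.Chars.find (c.drop i) p := by
        have := PySem.Chars.neg_one_le_find (c.drop i) p; omega
      obtain ⟨hocc, hmin⟩ := PySem.Chars.find_spec h1
      set f := PySem.Chars.find (c.drop i) p with hfdef
      set f' := PySem.Chars.find (c.drop (i + 1)) p with hf'def
      have hfpos : f.toNat ≠ 0 := by
        intro h0
        rw [h0] at hocc
        exact hp (by simpa using hocc)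
      -- occurrences in (drop i) at offset k+1 are occurrences in (drop (i+1)) at offset k
      have hshift : ∀ k : Nat, (p <+: (c.drop i).drop (k + 1)) ↔ (p <+: (c.drop (i + 1)).drop k) := by
        intro k
        rw [hdrop]
        have he : i + (k + 1) = i + 1 + k := by omega
        simp [he]
      have hle1 : f'.toNat ≤ f.toNat - 1 := by
        by_contra hlt
        exact hmin' (f.toNat - 1) (by omega) ((hshift (f.toNat - 1)).1 (by
          have : f.toNat - 1 + 1 = f.toNat := by omega
          rwa [this]))
      have hle2 : f.toNat ≤ f'.toNat + 1 := by
        by_contra hlt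
        exact hmin (f'.toNat + 1) (by omega) ((hshift f'.toNat).2 hocc')
      have heq : f.toNat = f'.toNat + 1 := by omega
      rw [if_neg hf, if_neg hf']
      rw [dif_neg (show ¬ ((i : Int) + f = -1) by omega),
        dif_neg (show ¬ (((i + 1 : Nat) : Int) + f' = -1) by push_cast; omega)]
      have e1 : ((i : Int) + f).toNat = (((i + 1 : Nat) : Int) + f').toNat := by
        push_cast; omega
      rw [e1]

theorem pvMerge_spec (rep p c : List Char) :
    ∀ k i, i + k = c.length →
      pvMerge rep (pvFindAll c p i) i (c.drop i) =
        (List.range' i k).flatMap (pvOut rep p c) := by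
  intro k
  induction k with
  | zero =>
    intro i hik
    rw [List.drop_eq_nil_of_le (by omega)]
    simp [pvMerge]
  | succ k ih =>
    intro i hik
    have hi : i < c.length := by omega
    have hdrop : c.drop i = getElem c i hi :: c.drop (i + 1) := List.drop_eq_getElem_cons hi
    have hch : getElem? c i = some (getElem c i hi) := List.getElem?_eq_getElem hi
    rw [pvFindAll_step c p i hi, List.range'_succ, List.flatMap_cons]
    by_cases hp : p <+: c.drop i
    · rw [if_pos hp, hdrop]
      have hstep : pvMerge rep (i :: pvFindAll c p (i + 1)) i (getElem c i hi :: c.drop (i + 1)) =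
          rep ++ pvMerge rep (pvFindAll c p (i + 1)) (i + 1) (c.drop (i + 1)) := by
        simp [pvMerge]
      rw [hstep, ih (i + 1) (by omega), pvOut, if_pos hp]
    · rw [if_neg hp, hdrop]
      have htail : pvMerge rep (pvFindAll c p (i + 1)) i (getElem c i hi :: c.drop (i + 1)) =
          getElem c i hi :: pvMerge rep (pvFindAll c p (i + 1)) (i + 1) (c.drop (i + 1)) := by
        cases hfa : pvFindAll c p (i + 1) with
        | nil => rfl
        | cons j js =>
          have hj : i + 1 ≤ j := pvFindAll_ge c p (i + 1) j (by rw [hfa]; simp)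
          show (if j = i then _ else _) = _
          rw [if_neg (by omega)]
      rw [htail, ih (i + 1) (by omega), pvOut, if_neg hp, hch]
      rfl

theorem pvFlatMap_congr {α β : Type} (l : List α) (f g : α → List β)
    (h : ∀ x ∈ l, f x = g x) : l.flatMap f = l.flatMap g := by
  induction l with
  | nil => rfl
  | cons x t ih =>
    simp only [List.flatMap_cons, h x (by simp), ih (fun y hy => h y (by simp [hy]))]

-- ===== VERDICT (by name: the statement is the Claim_ definition above) =====
theorem replace_spec : Claim_equal_replace := by
  intro pattern replacement corpus _
  unfold Spec_replace replace replace_alt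
  congr 1
  -- A's loop body, as 'append one chunk per index'
  have hbody : (fun (acc : List Char) (index : Nat) =>
      if PySem.List.slice corpus.toList (some (index : Int)) (some ((index : Int) + (pattern.toList.length : Int))) = pattern.toList
      then acc ++ replacement.toList
      else acc ++ (PySem.List.pyGet? corpus.toList (index : Int)).toList) =
      (fun (acc : List Char) (index : Nat) => acc ++
        (if PySem.List.slice corpus.toList (some (index : Int)) (some ((index : Int) + (pattern.toList.length : Int))) = pattern.toList
         then replacement.toList
         else (PySem.List.pyGet? corpus.toList (index : Int)).toList)) := by
    funext acc index
    split <;> rfl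
  rw [hbody, PySem.List.foldl_append_eq_flatMap, List.nil_append]
  -- per-index chunks of A coincide with pvOut
  have hA : ∀ j ∈ List.range corpus.toList.length,
      (if PySem.List.slice corpus.toList (some (j : Int)) (some ((j : Int) + (pattern.toList.length : Int))) = pattern.toList
       then replacement.toList
       else (PySem.List.pyGet? corpus.toList (j : Int)).toList) =
      pvOut replacement.toList pattern.toList corpus.toList j := by
    intro j _
    rw [PySem.List.slice_natCast_add, PySem.List.pyGet?_natCast, pvOut]
    by_cases hp : pattern.toList <+: corpus.toList.drop j
    · rw [if_pos hp, if_pos (List.prefix_iff_eq_take.1 hp).symm]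
    · rw [if_neg hp, if_neg (fun he => hp (List.prefix_iff_eq_take.2 he.symm))]
  rw [pvFlatMap_congr _ _ _ hA]
  have := pvMerge_spec replacement.toList pattern.toList corpus.toList corpus.toList.length 0 (by omega)
  rw [List.drop_zero] at this
  rw [this, List.range_eq_range']
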